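-- pv_equiv track=rewrite | github.com/marcie-kang/codewars-solutions | python/[6kyu] Break camelCase.py | solution
-- ===== SOURCE A (Python) =====
-- def solution(s):
--     copied = list(s)
--     is_on = True
--     answer = []
--
--     while len(copied):
--         if ord(copied[0]) >= 65 and ord(copied[0]) <= 90:
--             answer.append(" " + copied[0])
--         else:
--             answer.append(copied[0])
--         del copied[0]
--
--     return "".join(answer)
-- ===== SOURCE B (Python) =====
-- import re
--
-- def solution(s):
--     return re.sub(r'([A-Z])', r' \1', s)
-- ===== Notes on version B (the rewrite author's own statement) =====
-- stated objective: idiomatic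
-- what changed: Replaced the manual while-loop that pops each character off a list copy and ord-tests it with a single regex substitution inserting a space before every ASCII uppercase letter.
import Mathlib
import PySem

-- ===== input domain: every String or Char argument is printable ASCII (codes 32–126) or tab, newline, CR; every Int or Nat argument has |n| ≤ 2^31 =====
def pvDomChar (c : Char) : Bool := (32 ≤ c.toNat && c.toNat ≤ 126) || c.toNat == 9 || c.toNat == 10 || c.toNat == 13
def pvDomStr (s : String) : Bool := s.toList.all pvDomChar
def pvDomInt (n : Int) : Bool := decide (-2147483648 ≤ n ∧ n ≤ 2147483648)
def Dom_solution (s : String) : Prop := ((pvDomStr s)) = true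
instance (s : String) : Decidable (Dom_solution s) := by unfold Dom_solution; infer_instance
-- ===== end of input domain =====

-- B inserts the spaces with one regex substitution instead of A's pop-the-head loop; idiomatic, return value identical.

-- ===== PORT A =====
-- A's while loop: test ord of the head, append " "+c or c to answer, delete the head.
def solutionLoop (copied : List Char) (answer : List String) : List String :=
  match copied with
  | [] => answer
  | c :: rest =>
      if 65 ≤ c.toNat ∧ c.toNat ≤ 90 then
        solutionLoop rest (answer ++ [String.ofList [' ', c]])
      else
        solutionLoop rest (answer ++ [String.ofList [c]])

def solution (s : String) : String :=
  String.join (solutionLoop s.toList [])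

-- ===== PORT B =====
-- re.sub(r'([A-Z])', r' \1', s): the regex engine scans left to right replacing each
-- single char in A–Z by space+itself; ported by hand as a flatMap over the characters
-- (exact for this single-character pattern: matches are exactly the A–Z characters).
def solution_alt (s : String) : String :=
  String.ofList (s.toList.flatMap (fun c => if 'A' ≤ c ∧ c ≤ 'Z' then [' ', c] else [c]))

-- ===== PRECONDITION & SPEC =====
def Spec_solution (s : String) (out : String) : Prop := out = solution_alt s
instance (s : String) (out : String) : Decidable (Spec_solution s out) := by unfold Spec_solution; infer_instance

-- ===== CLAIM (what is proved, stated in full; the proofs are below) =====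
def Claim_equal_solution : Prop := ∀ (s : String), Dom_solution s → Spec_solution s (solution s)

-- ===== LEMMAS AND PROOFS =====

theorem solutionLoop_join (l : List Char) (ans : List String) :
    String.join (solutionLoop l ans) =
      String.join ans ++
        String.ofList (l.flatMap (fun c => if 'A' ≤ c ∧ c ≤ 'Z' then [' ', c] else [c])) := by
  induction l generalizing ans with
  | nil => simp [solutionLoop]
  | cons c rest ih =>
      have hc : (65 ≤ c.toNat ∧ c.toNat ≤ 90) ↔ ('A' ≤ c ∧ c ≤ 'Z') := by
        constructor <;> intro h <;>
          exact ⟨by simpa [Char.le_def] using h.1, by simpa [Char.le_def] using h.2⟩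
      by_cases h : 'A' ≤ c ∧ c ≤ 'Z'
      · simp only [solutionLoop, hc, if_pos h, ih]
        apply String.ext
        simp [String.join, h]
      · simp only [solutionLoop, hc, if_neg h, ih]
        apply String.ext
        simp [String.join, h]

-- ===== VERDICT (by name: the statement is the Claim_ definition above) =====
theorem solution_spec : Claim_equal_solution := by
  intro s _
  unfold Spec_solution solution solution_alt
  simpa using solutionLoop_join s.toList []
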